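-- pv_equiv track=rewrite | github.com/mattmaeda/coding_problems | number_picker/picker.py | proximity_searcher
-- ===== SOURCE A (Python) =====
-- def proximity_searcher(num_list):
--     max_count = 0
--     uniques = set(num_list)
--     for i in uniques:
--         if num_list.count(i) > max_count:
--             max_count = num_list.count(i)
--         for x in uniques:
--             if x != i and abs(i - x) <= 1:
--                 if (num_list.count(i) + num_list.count(x)) > max_count:
--                     max_count = num_list.count(i) + num_list.count(x)
--
--
--
--     return max_count
-- ===== SOURCE B (Python) =====
-- def proximity_searcher(num_list):
--     counts = {}
--     for v in num_list:
--         counts[v] = counts.get(v, 0) + 1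
--     best = 0
--     for v, c in counts.items():
--         t = c + counts.get(v + 1, 0)
--         if t > best:
--             best = t
--     return best
-- ===== Notes on version B (the rewrite author's own statement) =====
-- stated objective: faster
-- what changed: Replace the quadratic scan over all pairs of unique values (each with repeated list.count passes) by one counting-dict pass plus one pass over the dict checking only v and v+1; pairs (v, v-1) are covered symmetrically by the entry for v-1.
import Mathlib
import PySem

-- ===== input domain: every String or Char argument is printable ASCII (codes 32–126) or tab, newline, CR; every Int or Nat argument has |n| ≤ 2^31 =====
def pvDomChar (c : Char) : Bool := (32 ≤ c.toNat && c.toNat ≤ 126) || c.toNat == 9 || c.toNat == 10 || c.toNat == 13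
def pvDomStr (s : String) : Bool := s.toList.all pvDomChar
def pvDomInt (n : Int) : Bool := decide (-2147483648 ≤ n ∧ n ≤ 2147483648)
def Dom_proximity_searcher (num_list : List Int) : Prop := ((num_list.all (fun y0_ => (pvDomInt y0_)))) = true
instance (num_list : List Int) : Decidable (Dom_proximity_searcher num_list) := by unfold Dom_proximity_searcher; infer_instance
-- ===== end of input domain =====

-- B replaces A's O(U^2) all-pairs scan with repeated list.count passes by one counting-dict
-- pass and one pass over the dict looking only at v and v+1 (objective: faster, asymptotic).

-- ===== PORT A =====
def proximity_searcher (num_list : List Int) : Int :=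
  let uniques : PySem.Set Int := PySem.Set.ofList num_list
  uniques.foldl (fun mc i =>
    let mc := if ((PySem.List.count num_list i : Int)) > mc then (PySem.List.count num_list i : Int) else mc
    uniques.foldl (fun mc x =>
      if x ≠ i ∧ |i - x| ≤ 1 then
        (if (PySem.List.count num_list i : Int) + (PySem.List.count num_list x : Int) > mc
         then (PySem.List.count num_list i : Int) + (PySem.List.count num_list x : Int) else mc)
      else mc) mc) 0

-- ===== PORT B =====
def proximity_searcher_alt (num_list : List Int) : Int :=
  let counts : PySem.Dict Int Int :=
    num_list.foldl (fun d v => d.insert v (d.getD v 0 + 1)) PySem.Dict.empty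
  counts.items.foldl (fun best vc =>
    let t := vc.2 + counts.getD (vc.1 + 1) 0
    if t > best then t else best) 0

-- ===== PRECONDITION & SPEC =====
def Spec_proximity_searcher (num_list : List Int) (out : Int) : Prop := out = proximity_searcher_alt num_list
instance (num_list : List Int) (out : Int) : Decidable (Spec_proximity_searcher num_list out) := by unfold Spec_proximity_searcher; infer_instance

-- ===== CLAIM (what is proved, stated in full; the proofs are below) =====
def Claim_equal_proximity_searcher : Prop := ∀ (num_list : List Int), Dom_proximity_searcher num_list → Spec_proximity_searcher num_list (proximity_searcher num_list)

-- ===== LEMMAS AND PROOFS =====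

-- generic facts about a running-max-style fold with an arbitrary step
theorem pv_le_foldl_step {α : Type} (u : List α) (step : Int → α → Int) (init : Int)
    (hmono : ∀ m i, i ∈ u → m ≤ step m i) : init ≤ u.foldl step init := by
  induction u generalizing init with
  | nil => simp
  | cons a t ih =>
    simp only [List.foldl_cons]
    exact le_trans (hmono init a (by simp))
      (ih _ (fun m i hi => hmono m i (List.mem_cons_of_mem _ hi)))

theorem pv_foldl_step_le {α : Type} (u : List α) (step : Int → α → Int) (init b : Int)
    (h0 : init ≤ b) (h : ∀ m i, i ∈ u → m ≤ b → step m i ≤ b) : u.foldl step init ≤ b := by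
  induction u generalizing init with
  | nil => simpa using h0
  | cons a t ih =>
    simp only [List.foldl_cons]
    exact ih _ (h init a (by simp) h0) (fun m i hi hm => h m i (List.mem_cons_of_mem _ hi) hm)

theorem pv_cand_le_foldl_step {α : Type} (u : List α) (step : Int → α → Int) (init c : Int)
    (i₀ : α) (hmono : ∀ m i, i ∈ u → m ≤ step m i) (hi : i₀ ∈ u)
    (hc : ∀ m, c ≤ step m i₀) : c ≤ u.foldl step init := by
  induction u generalizing init with
  | nil => cases hi
  | cons a t ih =>
    simp only [List.foldl_cons]
    rcases List.mem_cons.mp hi with h | h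
    · subst h
      exact le_trans (hc init)
        (pv_le_foldl_step t step _ (fun m i hi' => hmono m i (List.mem_cons_of_mem _ hi')))
    · exact ih _ (fun m i hi' => hmono m i (List.mem_cons_of_mem _ hi')) h

-- B's port, rewritten as a running max of count(v) + count(v+1) over the distinct values
theorem pv_alt_eq (l : List Int) :
    proximity_searcher_alt l =
      (PySem.Set.ofList l).foldl
        (fun best v =>
          if (List.count v l : Int) + (List.count (v + 1) l : Int) > best
          then (List.count v l : Int) + (List.count (v + 1) l : Int) else best) 0 := by
  unfold proximity_searcher_alt
  rw [PySem.Dict.foldl_insert_getD_add_one_eq_counter]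
  simp only [PySem.Dict.items_counter, List.foldl_map, PySem.Dict.getD_counter]

-- A's port with PySem.List.count unfolded to List.count
theorem pv_a_eq (l : List Int) :
    proximity_searcher l =
      (PySem.Set.ofList l).foldl (fun mc i =>
        (PySem.Set.ofList l).foldl (fun mc x =>
          if x ≠ i ∧ |i - x| ≤ 1 then
            (if (List.count i l : Int) + (List.count x l : Int) > mc
             then (List.count i l : Int) + (List.count x l : Int) else mc)
          else mc) (if (List.count i l : Int) > mc then (List.count i l : Int) else mc)) 0 := by
  unfold proximity_searcher
  simp only [PySem.List.count_eq]

-- the combinatorial core: for any nonnegative weight C vanishing off u, A's nested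
-- all-pairs running max equals B's single pass over v, v+1
theorem pv_core (u : List Int) (C : Int → Int) (hnn : ∀ v, 0 ≤ C v)
    (hz : ∀ v, v ∉ u → C v = 0) :
    u.foldl (fun mc i =>
      u.foldl (fun mc x =>
        if x ≠ i ∧ |i - x| ≤ 1 then
          (if C i + C x > mc then C i + C x else mc)
        else mc) (if C i > mc then C i else mc)) 0
    = u.foldl (fun best v => if C v + C (v + 1) > best then C v + C (v + 1) else best) 0 := by
  set stepB : Int → Int → Int :=
    fun best v => if C v + C (v + 1) > best then C v + C (v + 1) else best with hstepB
  set inner : Int → Int → Int → Int := fun i mc x =>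
    if x ≠ i ∧ |i - x| ≤ 1 then (if C i + C x > mc then C i + C x else mc) else mc with hinner
  set stepA : Int → Int → Int := fun mc i =>
    u.foldl (inner i) (if C i > mc then C i else mc) with hstepA
  have hmonoB : ∀ m v, v ∈ u → m ≤ stepB m v := by
    intro m v _; simp only [hstepB]; split <;> omega
  have hmonoI : ∀ i m x, x ∈ u → m ≤ inner i m x := by
    intro i m x _; simp only [hinner]; split
    · split <;> omega
    · omega
  have hmonoA : ∀ m i, i ∈ u → m ≤ stepA m i := by
    intro m i _
    simp only [hstepA]
    refine le_trans ?_ (pv_le_foldl_step u (inner i) _ (hmonoI i))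
    split <;> omega
  have hBge : ∀ v, v ∈ u → C v + C (v + 1) ≤ u.foldl stepB 0 := by
    intro v hv
    refine pv_cand_le_foldl_step u stepB 0 (C v + C (v + 1)) v hmonoB hv ?_
    intro m; simp only [hstepB]; split <;> omega
  apply le_antisymm
  · -- A ≤ B
    refine pv_foldl_step_le u stepA 0 _ ?_ ?_
    · exact pv_le_foldl_step u stepB 0 hmonoB
    · intro m i hi hm
      simp only [hstepA]
      refine pv_foldl_step_le u (inner i) _ _ ?_ ?_
      · have := hBge i hi
        have := hnn (i + 1)
        split <;> omega
      · intro m' x hx hm'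
        simp only [hinner]; split
        · next hcond =>
          split
          · have habs := abs_le.mp hcond.2
            have hxx : x = i + 1 ∨ x = i - 1 := by
              rcases hcond with ⟨hne, _⟩; omega
            rcases hxx with rfl | rfl
            · exact le_trans (le_refl _) (hBge i hi)
            · have := hBge (i - 1) hx
              rw [sub_add_cancel] at this
              omega
          · exact hm'
        · exact hm'
  · -- B ≤ A
    refine pv_foldl_step_le u stepB 0 _ ?_ ?_
    · exact pv_le_foldl_step u stepA 0 hmonoA
    · intro m v hv hm
      simp only [hstepB]; split
      · by_cases hv1 : v + 1 ∈ u
        · refine pv_cand_le_foldl_step u stepA 0 (C v + C (v + 1)) v hmonoA hv ?_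
          intro m'
          simp only [hstepA]
          refine pv_cand_le_foldl_step u (inner v) _ (C v + C (v + 1)) (v + 1) (hmonoI v) hv1 ?_
          intro m''
          have hcond : (v + 1) ≠ v ∧ |v - (v + 1)| ≤ 1 := by
            constructor
            · omega
            · have h1 : v - (v + 1) = -1 := by ring
              rw [h1]; decide
          simp only [hinner, if_pos hcond]
          split <;> omega
        · have hc0 : C (v + 1) = 0 := hz _ hv1
          refine pv_cand_le_foldl_step u stepA 0 (C v + C (v + 1)) v hmonoA hv ?_
          intro m'
          simp only [hstepA]
          refine le_trans ?_ (pv_le_foldl_step u (inner v) _ (hmonoI v))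
          split <;> omega
      · exact hm

theorem proximity_searcher_spec_aux (l : List Int) :
    proximity_searcher l = proximity_searcher_alt l := by
  rw [pv_a_eq, pv_alt_eq]
  refine pv_core (PySem.Set.ofList l) (fun v => (List.count v l : Int)) ?_ ?_
  · intro v; exact Int.natCast_nonneg _
  · intro v hv
    have : v ∉ l := fun h => hv ((PySem.Set.mem_ofList l v).mpr h)
    simp [List.count_eq_zero_of_not_mem this]

-- ===== VERDICT (by name: the statement is the Claim_ definition above) =====
theorem proximity_searcher_spec : Claim_equal_proximity_searcher := by
  intro l _
  unfold Spec_proximity_searcher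
  exact proximity_searcher_spec_aux l
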